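-- pv_equiv track=rewrite | github.com/kryptn/confg | confg/engine.py | _unique_priorities
-- ===== SOURCE A (Python) =====
-- def _unique_priorities(config):
--     priorities = []
--     for name, block in config.items():
--         priority = block.get('priority', 0)
--         if priority in priorities:
--             return False
--         priorities.append(priority)
--     return True
-- ===== SOURCE B (Python) =====
-- def _unique_priorities(config):
--     vals = [block.get('priority', 0) for block in config.values()]
--     return len(vals) == len(set(vals))
-- ===== Notes on version B (the rewrite author's own statement) =====
-- stated objective: simpler
-- what changed: Replaces the early-exit loop with a per-element linear membership scan over a growing list by a single comprehension plus a count-vs-distinct-count comparison (len(vals) == len(set(vals))).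
import Mathlib
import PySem

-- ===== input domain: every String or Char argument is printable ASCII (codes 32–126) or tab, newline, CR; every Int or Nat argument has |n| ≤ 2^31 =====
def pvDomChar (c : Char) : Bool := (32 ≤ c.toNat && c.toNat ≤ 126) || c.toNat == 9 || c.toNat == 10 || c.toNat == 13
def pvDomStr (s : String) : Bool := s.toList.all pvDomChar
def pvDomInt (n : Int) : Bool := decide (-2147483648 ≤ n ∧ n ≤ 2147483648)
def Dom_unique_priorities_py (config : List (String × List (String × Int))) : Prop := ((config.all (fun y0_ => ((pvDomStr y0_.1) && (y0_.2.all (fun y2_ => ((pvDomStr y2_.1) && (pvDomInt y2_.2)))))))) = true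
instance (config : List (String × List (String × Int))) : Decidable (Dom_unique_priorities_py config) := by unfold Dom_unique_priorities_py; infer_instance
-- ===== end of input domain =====

-- B replaces A's early-exit loop with a membership scan by a one-pass count-vs-distinct-count comparison (simpler).

-- ===== PORT A =====
-- the for-loop with early `return False`, carrying the growing `priorities` list
def uniquePrioLoop : List (String × List (String × Int)) → List Int → Bool
  | [], _ => true
  | (_, block) :: rest, priorities =>
    let priority := PySem.Dict.getD (PySem.Dict.mk block) "priority" 0
    if priority ∈ priorities then false
    else uniquePrioLoop rest (priorities ++ [priority])

def unique_priorities_py (config : List (String × List (String × Int))) : Bool :=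
  uniquePrioLoop config []

-- ===== PORT B =====
def unique_priorities_py_alt (config : List (String × List (String × Int))) : Bool :=
  let vals := config.map (fun b => PySem.Dict.getD (PySem.Dict.mk b.2) "priority" 0)
  vals.length == (PySem.Set.ofList vals).length

-- ===== PRECONDITION & SPEC =====
def Spec_unique_priorities_py (config : List (String × List (String × Int))) (out : Bool) : Prop := out = unique_priorities_py_alt config
instance (config : List (String × List (String × Int))) (out : Bool) : Decidable (Spec_unique_priorities_py config out) := by unfold Spec_unique_priorities_py; infer_instance

-- ===== CLAIM (what is proved, stated in full; the proofs are below) =====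
def Claim_equal_unique_priorities_py : Prop := ∀ (config : List (String × List (String × Int))), Dom_unique_priorities_py config → Spec_unique_priorities_py config (unique_priorities_py config)

-- ===== LEMMAS AND PROOFS =====

-- A's loop returns True iff the remaining priorities are pairwise distinct and avoid the accumulator
theorem uniquePrioLoop_true_iff (rest : List (String × List (String × Int))) (acc : List Int) :
    uniquePrioLoop rest acc = true
      ↔ ((rest.map (fun b => PySem.Dict.getD (PySem.Dict.mk b.2) "priority" 0)).Nodup ∧
          ∀ v ∈ rest.map (fun b => PySem.Dict.getD (PySem.Dict.mk b.2) "priority" 0), v ∉ acc) := by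
  induction rest generalizing acc with
  | nil => simp [uniquePrioLoop]
  | cons hd tl ih =>
    simp only [uniquePrioLoop, List.map_cons]
    by_cases h : PySem.Dict.getD (PySem.Dict.mk hd.2) "priority" 0 ∈ acc
    · simp only [if_pos h, Bool.false_eq_true, false_iff]
      rintro ⟨-, hall⟩
      exact hall _ (List.mem_cons_self) h
    · rw [if_neg h, ih]
      simp only [List.nodup_cons, List.mem_cons, List.mem_append,
        List.not_mem_nil, or_false]
      constructor
      · rintro ⟨hnd, hall⟩
        refine ⟨⟨fun hm => (hall _ hm) (Or.inr rfl), hnd⟩, ?_⟩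
        rintro v (rfl | hv)
        · exact h
        · exact fun hc => (hall _ hv) (Or.inl hc)
      · rintro ⟨⟨hnm, hnd⟩, hall⟩
        refine ⟨hnd, fun v hv hc => ?_⟩
        rcases hc with hc | hc
        · exact hall v (Or.inr hv) hc
        · exact hnm (hc ▸ hv)

-- upper bound: adding to a set grows its length by at most one per element
theorem foldl_add_len_le (xs : List Int) (s : List Int) :
    (xs.foldl PySem.Set.add s).length ≤ s.length + xs.length := by
  induction xs generalizing s with
  | nil => simp
  | cons x t ih =>
    simp only [List.foldl_cons, List.length_cons]
    have h1 := ih (PySem.Set.add s x)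
    have h2 : (PySem.Set.add s x).length ≤ s.length + 1 := by
      simp only [PySem.Set.add]
      split
      · omega
      · simp
    omega

-- the count-vs-distinct-count test decides Nodup (generalized over the fold's seed)
theorem foldl_add_len (xs : List Int) (s : List Int) :
    ((xs.foldl PySem.Set.add s).length = s.length + xs.length)
      ↔ (xs.Nodup ∧ ∀ x ∈ xs, x ∉ s) := by
  induction xs generalizing s with
  | nil => simp
  | cons x t ih =>
    simp only [List.foldl_cons, List.length_cons]
    by_cases h : PySem.Set.contains s x = true
    · have hx : x ∈ s := (PySem.Set.contains_iff s x).mp h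
      have hadd : PySem.Set.add s x = s := by unfold PySem.Set.add; rw [if_pos h]
      rw [hadd]
      constructor
      · intro hlen
        have := foldl_add_len_le t s
        omega
      · rintro ⟨-, hall⟩
        exact absurd hx (hall x List.mem_cons_self)
    · have hx : x ∉ s := fun hm => h ((PySem.Set.contains_iff s x).mpr hm)
      have hadd : PySem.Set.add s x = s ++ [x] := by unfold PySem.Set.add; rw [if_neg h]
      rw [hadd]
      have hih := ih (s ++ [x])
      simp only [List.length_append, List.length_cons, List.length_nil, Nat.zero_add] at hih
      rw [show s.length + (t.length + 1) = s.length + 1 + t.length by omega, hih]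
      simp only [List.nodup_cons, List.mem_append, List.mem_cons,
        List.not_mem_nil, or_false]
      constructor
      · rintro ⟨hnd, hall⟩
        refine ⟨⟨fun hm => (hall x hm) (Or.inr rfl), hnd⟩, ?_⟩
        rintro y (rfl | hy)
        · exact hx
        · exact fun hc => (hall y hy) (Or.inl hc)
      · rintro ⟨⟨hnm, hnd⟩, hall⟩
        refine ⟨hnd, fun y hy hc => ?_⟩
        rcases hc with hc | rfl
        · exact hall y (Or.inr hy) hc
        · exact hnm hy

-- ===== VERDICT (by name: the statement is the Claim_ definition above) =====
theorem unique_priorities_py_spec : Claim_equal_unique_priorities_py := by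
  intro config _
  unfold Spec_unique_priorities_py unique_priorities_py unique_priorities_py_alt
  rw [Bool.eq_iff_iff, uniquePrioLoop_true_iff]
  simp only [PySem.Set.ofList_eq_foldl, beq_iff_eq, List.not_mem_nil, not_false_iff,
    implies_true, and_true]
  have h := foldl_add_len (config.map (fun b => PySem.Dict.getD (PySem.Dict.mk b.2) "priority" 0)) []
  simp only [List.length_nil, Nat.zero_add, List.not_mem_nil, not_false_iff, implies_true,
    and_true] at h
  rw [eq_comm]
  exact h.symm
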